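-- pv_equiv track=rewrite | github.com/Houdongyue1283/Ribo-LD | utils/eval_seq.py | refine_ss
-- ===== SOURCE A (Python) =====
-- def refine_ss(structure: str) -> str:
--     # Stack tracks the positions of left parentheses
--     stack = []
--     result = list(structure)  # Convert to list for in-place edits
--
--     # Traverse the structure and match parentheses
--     for i, char in enumerate(structure):
--         if char == '(':
--             stack.append(i)  # Push left parenthesis
--         elif char == ')':
--             if stack:
--                 stack.pop()  # Match with a left parenthesis
--             else:
--                 result[i] = '.'  # Unmatched right parenthesis -> '.'
--
--     # Replace remaining unmatched left parentheses with '.'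
--     for i in stack:
--         result[i] = '.'
--
--     # Return the refined structure
--     return ''.join(result)
-- ===== SOURCE B (Python) =====
-- def refine_ss(structure: str) -> str:
--     # Forward pass: a balance counter; an unmatched closing paren (balance zero) becomes a dot
--     res = []
--     bal = 0
--     for ch in structure:
--         if ch == '(':
--             bal += 1
--             res.append(ch)
--         elif ch == ')':
--             if bal > 0:
--                 bal -= 1
--                 res.append(ch)
--             else:
--                 res.append('.')
--         else:
--             res.append(ch)
--     # Backward pass over the forward result: an unmatched opening paren (balance zero) becomes a dot
--     out = []
--     bal = 0
--     for ch in reversed(res):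
--         if ch == ')':
--             bal += 1
--             out.append(ch)
--         elif ch == '(':
--             if bal > 0:
--                 bal -= 1
--                 out.append(ch)
--             else:
--                 out.append('.')
--         else:
--             out.append(ch)
--     return ''.join(reversed(out))
-- ===== Notes on version B (the rewrite author's own statement) =====
-- stated objective: alternative
-- what changed: Replaces the position stack plus two index-based patching loops with two pure balance-counter passes: a forward scan dotting unmatched closing parens and a backward scan over the reversed result dotting unmatched opening parens, with no stored positions or in-place index writes.
import Mathlib
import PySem

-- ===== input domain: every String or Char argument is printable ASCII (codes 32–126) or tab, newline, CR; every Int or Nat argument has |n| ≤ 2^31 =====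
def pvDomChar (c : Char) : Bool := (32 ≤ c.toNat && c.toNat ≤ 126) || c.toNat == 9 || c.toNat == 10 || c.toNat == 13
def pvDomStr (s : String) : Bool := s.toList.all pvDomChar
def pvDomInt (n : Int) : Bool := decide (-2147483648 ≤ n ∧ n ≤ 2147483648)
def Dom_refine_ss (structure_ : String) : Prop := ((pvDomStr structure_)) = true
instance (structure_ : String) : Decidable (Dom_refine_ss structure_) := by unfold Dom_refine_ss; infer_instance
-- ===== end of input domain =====

-- B replaces A's stack of '(' positions and in-place index patching by two pure
-- balance-counter passes (a forward pass dots unmatched closers, a backward pass dots unmatched openers).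

-- ===== PORT A =====
-- the 'for i, char in enumerate(structure)' loop: state = (stack, result)
def refine_ss_loop : List (Int × Char) → List Int → List Char → List Int × List Char
  | [], stack, res => (stack, res)
  | (i, c) :: t, stack, res =>
    if c = '(' then
      refine_ss_loop t (stack ++ [i]) res            -- stack.append(i)
    else if c = ')' then
      if stack.isEmpty then
        refine_ss_loop t stack (PySem.List.pySetD res i '.')   -- result[i] = '.'
      else
        refine_ss_loop t stack.dropLast res          -- stack.pop()
    else
      refine_ss_loop t stack res

def refine_ss (structure_ : String) : String :=
  let p := refine_ss_loop (PySem.List.enumerate structure_.toList 0) [] structure_.toList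
  -- for i in stack: result[i] = '.'
  String.mk (p.1.foldl (fun r i => PySem.List.pySetD r i '.') p.2)

-- ===== PORT B =====
-- forward pass: 'for ch in structure' appending to res, balance counter bal
def refine_ss_fwd : List Char → Nat → List Char
  | [], _ => []
  | c :: t, bal =>
    if c = '(' then c :: refine_ss_fwd t (bal + 1)
    else if c = ')' then
      (if bal > 0 then c :: refine_ss_fwd t (bal - 1) else '.' :: refine_ss_fwd t bal)
    else c :: refine_ss_fwd t bal

-- backward pass: 'for ch in reversed(res)' appending to out, balance counter bal
def refine_ss_bwd : List Char → Nat → List Char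
  | [], _ => []
  | c :: t, bal =>
    if c = ')' then c :: refine_ss_bwd t (bal + 1)
    else if c = '(' then
      (if bal > 0 then c :: refine_ss_bwd t (bal - 1) else '.' :: refine_ss_bwd t bal)
    else c :: refine_ss_bwd t bal

def refine_ss_alt (structure_ : String) : String :=
  String.mk ((refine_ss_bwd ((refine_ss_fwd structure_.toList 0).reverse) 0).reverse)

-- ===== PRECONDITION & SPEC =====
def Spec_refine_ss (structure_ : String) (out : String) : Prop := out = refine_ss_alt structure_
instance (structure_ : String) (out : String) : Decidable (Spec_refine_ss structure_ out) := by unfold Spec_refine_ss; infer_instance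

-- ===== CLAIM (what is proved, stated in full; the proofs are below) =====
def Claim_equal_refine_ss : Prop := ∀ (structure_ : String), Dom_refine_ss structure_ → Spec_refine_ss structure_ (refine_ss structure_)

-- ===== LEMMAS AND PROOFS =====

-- Proof model: the forward scan, viewed as a stack of SEGMENTS (top first):
-- segs = [s_b, …, s_1, s_0] means the output so far is s_0 ++ '('::s_1 ++ … ++ '('::s_b,
-- the '(' separators being exactly the currently-unmatched '(' (= A's stack).

def pvAddTop : List (List Char) → Char → List (List Char)
  | [], _ => []
  | top :: rest, c => (top ++ [c]) :: rest

def pvSegs : List Char → List (List Char) → List (List Char)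
  | [], segs => segs
  | c :: t, segs =>
    if c = '(' then pvSegs t ([] :: segs)
    else if c = ')' then
      match segs with
      | top :: next :: rest => pvSegs t ((next ++ ('(' :: (top ++ [')']))) :: rest)
      | _ => pvSegs t (pvAddTop segs '.')
    else pvSegs t (pvAddTop segs c)

def pvFlat : List (List Char) → List Char
  | [] => []
  | [s] => s
  | s :: rest => pvFlat rest ++ '(' :: s

def pvFlatD : List (List Char) → List Char
  | [] => []
  | [s] => s
  | s :: rest => pvFlatD rest ++ '.' :: s

def pvPos : List (List Char) → List Int
  | [] => []
  | [_] => []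
  | _ :: rest => ((pvFlat rest).length : Int) :: pvPos rest

-- "matched" strings: every paren is matched
inductive pvM : List Char → Prop
  | nil : pvM []
  | app {a b : List Char} : pvM a → pvM b → pvM (a ++ b)
  | wrap {m : List Char} : pvM m → pvM (('(' :: m) ++ [')'])
  | chr {c : Char} : c ≠ '(' → c ≠ ')' → pvM [c]

theorem pvFlat_cons (s r : List Char) (rr : List (List Char)) :
    pvFlat (s :: r :: rr) = pvFlat (r :: rr) ++ '(' :: s := rfl

theorem pvFlatD_cons (s r : List Char) (rr : List (List Char)) :
    pvFlatD (s :: r :: rr) = pvFlatD (r :: rr) ++ '.' :: s := rfl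

theorem pvPos_cons (s r : List Char) (rr : List (List Char)) :
    pvPos (s :: r :: rr) = ((pvFlat (r :: rr)).length : Int) :: pvPos (r :: rr) := rfl

theorem pvFlat_push (segs : List (List Char)) (h : segs ≠ []) :
    pvFlat ([] :: segs) = pvFlat segs ++ ['('] := by
  cases segs with
  | nil => exact absurd rfl h
  | cons a r => rfl

theorem pvFlat_addTop (top : List Char) (rest : List (List Char)) (c : Char) :
    pvFlat ((top ++ [c]) :: rest) = pvFlat (top :: rest) ++ [c] := by
  cases rest with
  | nil => rfl
  | cons r rr => simp [pvFlat_cons]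

theorem pvPos_addTop (top : List Char) (rest : List (List Char)) (c : Char) :
    pvPos ((top ++ [c]) :: rest) = pvPos (top :: rest) := by
  cases rest with
  | nil => rfl
  | cons r rr => rfl

theorem pvFlat_merge (top next : List Char) (rest : List (List Char)) :
    pvFlat ((next ++ ('(' :: (top ++ [')']))) :: rest)
      = pvFlat (top :: next :: rest) ++ [')'] := by
  cases rest with
  | nil => simp [pvFlat]
  | cons r rr => simp [pvFlat_cons]

theorem pvPos_merge (top next : List Char) (rest : List (List Char)) :
    pvPos ((next ++ ('(' :: (top ++ [')']))) :: rest) = pvPos (next :: rest) := by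
  cases rest with
  | nil => rfl
  | cons r rr => rfl

theorem pvSegs_ne_nil (l : List Char) (segs : List (List Char)) (h : segs ≠ []) :
    pvSegs l segs ≠ [] := by
  induction l generalizing segs with
  | nil => simpa [pvSegs] using h
  | cons c t ih =>
    by_cases h1 : c = '('
    · simp only [pvSegs, h1, if_pos]
      exact ih _ (by simp)
    · by_cases h2 : c = ')'
      · cases segs with
        | nil => exact absurd rfl h
        | cons top rest =>
          cases rest with
          | nil =>
            simp only [pvSegs, h1, h2]
            exact ih _ (by simp [pvAddTop])
          | cons next rr =>
            simp only [pvSegs, h1, h2]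
            exact ih _ (by simp)
      · cases segs with
        | nil => exact absurd rfl h
        | cons top rest =>
          simp only [pvSegs, h1, h2]
          exact ih _ (by simp [pvAddTop])

-- length of pvFlatD equals length of pvFlat
theorem pvFlatD_length (segs : List (List Char)) :
    (pvFlatD segs).length = (pvFlat segs).length := by
  induction segs with
  | nil => rfl
  | cons s rest ih =>
    cases rest with
    | nil => rfl
    | cons r rr => simp [pvFlat_cons, pvFlatD_cons] at ih ⊢; omega

-- positions are nonnegative and inside pvFlat
theorem pvPos_bound (segs : List (List Char)) :
    ∀ i ∈ pvPos segs, 0 ≤ i ∧ i < ((pvFlat segs).length : Int) := by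
  induction segs with
  | nil => intro i hi; simp [pvPos] at hi
  | cons s rest ih =>
    cases rest with
    | nil => intro i hi; simp [pvPos] at hi
    | cons r rr =>
      intro i hi
      rw [pvPos_cons] at hi
      rcases List.mem_cons.mp hi with hi | hi
      · subst hi
        refine ⟨by positivity, ?_⟩
        rw [pvFlat_cons]
        simp
      · rcases ih i hi with ⟨h0, h1⟩
        refine ⟨h0, ?_⟩
        rw [pvFlat_cons]
        simp at h1 ⊢
        omega

-- setting at the boundary of an append
theorem pvSet_boundary (u v : List Char) (c x : Char) :
    (u ++ c :: v).set u.length x = u ++ x :: v := by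
  induction u with
  | nil => rfl
  | cons a t ih => simp [List.set, ih]

-- setting inside the left part of an append
theorem pvSet_left (u v : List Char) (n : Nat) (h : n < u.length) (x : Char) :
    (u ++ v).set n x = u.set n x ++ v := by
  induction u generalizing n with
  | nil => simp at h
  | cons a t ih =>
    cases n with
    | zero => rfl
    | succ m => simp [List.set, ih m (by simpa using h)]

-- A track, step 1: the main loop in terms of segments
theorem pvLoopA (l : List Char) (segs : List (List Char)) (h : segs ≠ []) :
    refine_ss_loop (PySem.List.enumerate l ((pvFlat segs).length : Int))
        (pvPos segs).reverse (pvFlat segs ++ l)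
      = ((pvPos (pvSegs l segs)).reverse, pvFlat (pvSegs l segs)) := by
  induction l generalizing segs with
  | nil => simp [refine_ss_loop, pvSegs, PySem.List.enumerate]
  | cons c t ih =>
    obtain ⟨top, rest, rfl⟩ : ∃ a r, segs = a :: r := by
      cases segs with
      | nil => exact absurd rfl h
      | cons a r => exact ⟨a, r, rfl⟩
    rw [PySem.List.enumerate_cons]
    by_cases h1 : c = '('
    · subst h1
      simp only [refine_ss_loop, if_pos, reduceIte]
      have e1 : pvFlat (top :: rest) ++ '(' :: t = pvFlat ([] :: top :: rest) ++ t := by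
        rw [pvFlat_push _ h]; simp
      have e2 : ((pvFlat (top :: rest)).length : Int) + 1
          = ((pvFlat ([] :: top :: rest)).length : Int) := by
        rw [pvFlat_push _ h]; push_cast; simp
      have e3 : (pvPos (top :: rest)).reverse ++ [((pvFlat (top :: rest)).length : Int)]
          = (pvPos ([] :: top :: rest)).reverse := by
        rw [pvPos_cons]; simp
      rw [e1, e2, e3, show pvSegs ('(' :: t) (top :: rest) = pvSegs t ([] :: top :: rest) from rfl]
      exact ih _ (by simp)
    · by_cases h2 : c = ')'
      · subst h2
        cases rest with
        | nil =>
          simp only [refine_ss_loop, h1, reduceIte, pvPos, List.reverse_nil,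
            List.isEmpty_nil]
          rw [PySem.List.pySetD_natCast]
          have e1 : (pvFlat [top] ++ ')' :: t).set (pvFlat [top]).length '.'
              = pvFlat [top ++ ['.']] ++ t := by
            rw [pvSet_boundary]
            show top ++ '.' :: t = (top ++ ['.']) ++ t
            simp
          have e2 : ((pvFlat [top]).length : Int) + 1 = ((pvFlat [top ++ ['.']]).length : Int) := by
            show ((top.length : Int)) + 1 = (((top ++ ['.']).length : Nat) : Int)
            push_cast; simp
          rw [e1, e2, show pvSegs (')' :: t) [top] = pvSegs t [top ++ ['.']] from rfl]
          have := ih [top ++ ['.']] (by simp)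
          simpa [pvPos] using this
        | cons next rr =>
          simp only [refine_ss_loop, h1, reduceIte, pvPos_cons, List.reverse_cons]
          rw [show ((pvPos (next :: rr)).reverse
              ++ [((pvFlat (next :: rr)).length : Int)]).isEmpty = false by simp]
          simp only [Bool.false_eq_true, if_false, List.dropLast_concat]
          have e1 : pvFlat (top :: next :: rr) ++ ')' :: t
              = pvFlat ((next ++ ('(' :: (top ++ [')']))) :: rr) ++ t := by
            rw [pvFlat_merge]; simp
          have e2 : ((pvFlat (top :: next :: rr)).length : Int) + 1
              = ((pvFlat ((next ++ ('(' :: (top ++ [')']))) :: rr)).length : Int) := by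
            rw [pvFlat_merge]; push_cast; simp
          have e3 : (pvPos (next :: rr)).reverse
              = (pvPos ((next ++ ('(' :: (top ++ [')']))) :: rr)).reverse := by
            rw [pvPos_merge]
          rw [e1, e2, e3,
            show pvSegs (')' :: t) (top :: next :: rr)
              = pvSegs t ((next ++ ('(' :: (top ++ [')']))) :: rr) from rfl]
          exact ih _ (by simp)
      · simp only [refine_ss_loop, h1, h2, reduceIte]
        have e1 : pvFlat (top :: rest) ++ c :: t = pvFlat ((top ++ [c]) :: rest) ++ t := by
          rw [pvFlat_addTop]; simp
        have e2 : ((pvFlat (top :: rest)).length : Int) + 1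
            = ((pvFlat ((top ++ [c]) :: rest)).length : Int) := by
          rw [pvFlat_addTop]; push_cast; simp
        have e3 : (pvPos (top :: rest)).reverse = (pvPos ((top ++ [c]) :: rest)).reverse := by
          rw [pvPos_addTop]
        have e4 : pvSegs (c :: t) (top :: rest) = pvSegs t ((top ++ [c]) :: rest) := by
          simp only [pvSegs, h1, h2, reduceIte]
          rfl
        rw [e1, e2, e3, e4]
        exact ih _ (by simp [pvAddTop])

-- A track, step 2: folding sets at in-range positions stays in the left part
theorem pvFoldSet (ps : List Int) (u v : List Char)
    (hb : ∀ i ∈ ps, 0 ≤ i ∧ i < (u.length : Int)) :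
    ps.foldl (fun r i => PySem.List.pySetD r i '.') (u ++ v)
      = ps.foldl (fun r i => PySem.List.pySetD r i '.') u ++ v := by
  induction ps generalizing u with
  | nil => rfl
  | cons i ps ih =>
    rcases hb i (List.mem_cons_self) with ⟨h0, h1⟩
    have hn : i.toNat < u.length := by omega
    simp only [List.foldl_cons]
    rw [PySem.List.pySetD_of_nonneg _ _ h0, PySem.List.pySetD_of_nonneg _ _ h0,
      pvSet_left u v i.toNat hn]
    exact ih (u.set i.toNat '.') (by
      intro j hj
      have := hb j (List.mem_cons_of_mem _ hj)
      simpa using this)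

-- A track, step 3: the final dotting loop produces pvFlatD
theorem pvDotA (segs : List (List Char)) :
    (pvPos segs).reverse.foldl (fun r i => PySem.List.pySetD r i '.') (pvFlat segs)
      = pvFlatD segs := by
  induction segs with
  | nil => rfl
  | cons s rest ih =>
    cases rest with
    | nil => rfl
    | cons r rr =>
      rw [pvPos_cons, List.reverse_cons, List.foldl_append, pvFlat_cons]
      rw [pvFoldSet _ _ _ (by
        intro i hi
        exact pvPos_bound (r :: rr) i (List.mem_reverse.mp hi))]
      rw [ih]
      simp only [List.foldl_cons, List.foldl_nil]
      rw [PySem.List.pySetD_of_nonneg _ _ (by positivity)]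
      rw [show (((pvFlat (r :: rr)).length : Int)).toNat = (pvFlatD (r :: rr)).length by
        rw [pvFlatD_length]; simp]
      rw [pvSet_boundary, pvFlatD_cons]

-- B track: the forward pass appends to the flattened segments
theorem pvFwdB (l : List Char) (segs : List (List Char)) (h : segs ≠ []) :
    pvFlat (pvSegs l segs) = pvFlat segs ++ refine_ss_fwd l (segs.length - 1) := by
  induction l generalizing segs with
  | nil => simp [pvSegs, refine_ss_fwd]
  | cons c t ih =>
    obtain ⟨top, rest, rfl⟩ : ∃ a r, segs = a :: r := by
      cases segs with
      | nil => exact absurd rfl h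
      | cons a r => exact ⟨a, r, rfl⟩
    by_cases h1 : c = '('
    · subst h1
      rw [show pvSegs ('(' :: t) (top :: rest) = pvSegs t ([] :: top :: rest) from rfl,
        ih _ (by simp), pvFlat_push _ h]
      simp only [refine_ss_fwd, reduceIte, List.length_cons]
      simp
    · by_cases h2 : c = ')'
      · subst h2
        cases rest with
        | nil =>
          rw [show pvSegs (')' :: t) [top] = pvSegs t [top ++ ['.']] from rfl,
            ih _ (by simp)]
          simp only [refine_ss_fwd, h1, reduceIte, List.length_cons]
          show pvFlat [top ++ ['.']] ++ _ = pvFlat [top] ++ _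
          simp [pvFlat]
        | cons next rr =>
          rw [show pvSegs (')' :: t) (top :: next :: rr)
              = pvSegs t ((next ++ ('(' :: (top ++ [')']))) :: rr) from rfl,
            ih _ (by simp), pvFlat_merge]
          simp only [refine_ss_fwd, h1, reduceIte, List.length_cons]
          rw [if_pos (by omega)]
          simp
      · rw [show pvSegs (c :: t) (top :: rest) = pvSegs t ((top ++ [c]) :: rest) by
            simp only [pvSegs, h1, h2, reduceIte]; rfl,
          ih _ (by simp), pvFlat_addTop]
        simp only [refine_ss_fwd, h1, h2, reduceIte, List.length_cons]
        simp

-- all segments stay matched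
theorem pvSegsM (l : List Char) (segs : List (List Char))
    (h : ∀ s ∈ segs, pvM s) : ∀ s ∈ pvSegs l segs, pvM s := by
  induction l generalizing segs with
  | nil => simpa [pvSegs] using h
  | cons c t ih =>
    by_cases h1 : c = '('
    · simp only [pvSegs, h1, if_pos]
      exact ih _ (by
        intro s hs
        rcases List.mem_cons.mp hs with rfl | hs
        · exact pvM.nil
        · exact h s hs)
    · by_cases h2 : c = ')'
      · cases segs with
        | nil =>
          simp only [pvSegs, h1, h2]
          exact ih _ (by intro s hs; simp [pvAddTop] at hs)
        | cons top rest =>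
          cases rest with
          | nil =>
            simp only [pvSegs, h1, h2]
            exact ih _ (by
              intro s hs
              simp only [pvAddTop, List.mem_cons, List.not_mem_nil, or_false] at hs
              subst hs
              exact pvM.app (h top (by simp)) (pvM.chr (by decide) (by decide)))
          | cons next rr =>
            simp only [pvSegs, h1, h2]
            exact ih _ (by
              intro s hs
              rcases List.mem_cons.mp hs with rfl | hs
              · refine pvM.app (h next (by simp)) ?_
                have : ('(' :: (top ++ [')'])) = ('(' :: top) ++ [')'] := by simp
                rw [this]
                exact pvM.wrap (h top (by simp))
              · exact h s (by simp [hs]))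
      · cases segs with
        | nil =>
          simp only [pvSegs, h1, h2]
          exact ih _ (by intro s hs; simp [pvAddTop] at hs)
        | cons top rest =>
          simp only [pvSegs, h1, h2]
          exact ih _ (by
            intro s hs
            simp only [pvAddTop, List.mem_cons] at hs
            rcases hs with rfl | hs
            · exact pvM.app (h top (by simp)) (pvM.chr h1 h2)
            · exact h s (by simp [hs]))

-- the backward pass walks through a matched block unchanged
theorem pvBwdM (m : List Char) (hm : pvM m) :
    ∀ (rest : List Char) (b : Nat),
      refine_ss_bwd (m.reverse ++ rest) b = m.reverse ++ refine_ss_bwd rest b := by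
  induction hm with
  | nil => intro rest b; simp
  | app ha hb iha ihb =>
    intro rest b
    rw [List.reverse_append, List.append_assoc, ihb, iha, List.append_assoc]
  | wrap hm ihm =>
    rename_i mm
    intro rest b
    rw [show ((('(' :: mm) ++ [')']).reverse ++ rest) = ')' :: (mm.reverse ++ ('(' :: rest)) by
      simp]
    rw [show refine_ss_bwd (')' :: (mm.reverse ++ ('(' :: rest))) b
        = ')' :: refine_ss_bwd (mm.reverse ++ ('(' :: rest)) (b + 1) by
      simp [refine_ss_bwd]]
    rw [ihm ('(' :: rest) (b + 1)]
    rw [show refine_ss_bwd ('(' :: rest) (b + 1) = '(' :: refine_ss_bwd rest b by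
      simp [refine_ss_bwd]]
    simp
  | chr hc1 hc2 =>
    intro rest b
    simp [refine_ss_bwd, hc1, hc2]

-- B track: the backward pass dots exactly the separators
theorem pvBwdB (segs : List (List Char)) (h : segs ≠ []) (hm : ∀ s ∈ segs, pvM s) :
    refine_ss_bwd (pvFlat segs).reverse 0 = (pvFlatD segs).reverse := by
  induction segs with
  | nil => exact absurd rfl h
  | cons s rest ih =>
    cases rest with
    | nil =>
      show refine_ss_bwd s.reverse 0 = s.reverse
      have := pvBwdM s (hm s (by simp)) [] 0
      simpa [refine_ss_bwd] using this
    | cons r rr =>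
      rw [pvFlat_cons, pvFlatD_cons, List.reverse_append, List.reverse_cons]
      have hs : pvM s := hm s (by simp)
      rw [List.append_assoc, pvBwdM s hs _ 0]
      rw [show refine_ss_bwd (['('] ++ (pvFlat (r :: rr)).reverse) 0
          = '.' :: refine_ss_bwd (pvFlat (r :: rr)).reverse 0 by
        simp [refine_ss_bwd]]
      rw [ih (by simp) (by intro x hx; exact hm x (by simp [hx]))]
      simp

-- ===== VERDICT (by name: the statement is the Claim_ definition above) =====
theorem refine_ss_spec : Claim_equal_refine_ss := by
  intro s _
  unfold Spec_refine_ss refine_ss refine_ss_alt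
  have h0 : ([([] : List Char)] : List (List Char)) ≠ [] := by simp
  have hA := pvLoopA s.toList [[]] h0
  simp only [pvFlat, pvPos, List.reverse_nil, List.nil_append, List.length_nil,
    Int.natCast_zero] at hA
  simp only [hA]
  have hB := pvFwdB s.toList [[]] h0
  simp only [pvFlat, List.nil_append, List.length_cons, List.length_nil,
    Nat.add_sub_cancel] at hB
  rw [pvDotA, ← hB,
    pvBwdB _ (pvSegs_ne_nil _ _ h0)
      (pvSegsM _ _ (by intro x hx; simp at hx; subst hx; exact pvM.nil)),
    List.reverse_reverse]
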